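-- pv_equiv track=rewrite | github.com/dany-reyna/The-Bitmap-Bible-LP | chapter_1/4_palindrome_permutation/bit_vector_with_xor.py | create_bit_vector
-- ===== SOURCE A (Python) =====
-- def create_bit_vector(string):
--     bit_vector = 0
--     for c in string:
--         if c.isalnum():
--             diff = ord(c.lower()) - ord(' ')
--             mask = 1 << diff
--
--             bit_vector ^= mask
--     return bit_vector
-- ===== SOURCE B (Python) =====
-- def create_bit_vector(string):
--     counts = {}
--     for c in string:
--         if c.isalnum():
--             key = c.lower()
--             counts[key] = counts.get(key, 0) + 1
--     bit_vector = 0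
--     for key, n in counts.items():
--         if n % 2 == 1:
--             bit_vector ^= 1 << (ord(key) - ord(' '))
--     return bit_vector
-- ===== Notes on version B (the rewrite author's own statement) =====
-- stated objective: alternative
-- what changed: Instead of XOR-toggling a mask per character, B first builds a count table keyed by the lowered character and then sets the bit once for each key with an odd count.
import Mathlib
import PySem

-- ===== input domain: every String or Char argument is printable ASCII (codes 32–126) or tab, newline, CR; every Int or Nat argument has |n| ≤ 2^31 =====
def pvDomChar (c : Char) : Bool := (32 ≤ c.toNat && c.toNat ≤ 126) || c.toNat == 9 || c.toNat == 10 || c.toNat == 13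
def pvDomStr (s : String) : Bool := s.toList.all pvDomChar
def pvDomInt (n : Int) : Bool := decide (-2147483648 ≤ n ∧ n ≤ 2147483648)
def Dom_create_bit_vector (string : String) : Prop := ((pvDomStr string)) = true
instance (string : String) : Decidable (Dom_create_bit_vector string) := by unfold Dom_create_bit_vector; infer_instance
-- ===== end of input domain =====

-- B replaces A's per-character XOR toggling by a count-table pass (dict keyed by the lowered
-- character) followed by setting one bit per key with an odd count; same cost, different structure.


-- ===== PORT A =====
-- 'ord(c.lower()) - ord(' ')' is ported as the Nat subtraction 'toNat - 32': exact on the domain,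
-- where every alphanumeric character has code ≥ 48 (Python would raise on a negative shift anyway).
def create_bit_vector (string : String) : Int :=
  string.toList.foldl (fun bit_vector c =>
    if PySem.Chars.isalnum c then
      PySem.Int.bxor bit_vector ((1 : Int) <<< (((PySem.Chars.lowerChar c).toNat - 32 : Nat)))
    else bit_vector) 0

-- ===== PORT B =====
def create_bit_vector_alt (string : String) : Int :=
  let counts : PySem.Dict Char Int :=
    string.toList.foldl (fun d c =>
      if PySem.Chars.isalnum c then
        d.insert (PySem.Chars.lowerChar c) (d.getD (PySem.Chars.lowerChar c) 0 + 1)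
      else d) PySem.Dict.empty
  counts.items.foldl (fun bit_vector kv =>
    if PySem.Int.mod kv.2 2 == 1 then
      PySem.Int.bxor bit_vector ((1 : Int) <<< ((kv.1.toNat - 32 : Nat)))
    else bit_vector) 0

-- ===== PRECONDITION & SPEC =====
def Spec_create_bit_vector (string : String) (out : Int) : Prop := out = create_bit_vector_alt string
instance (string : String) (out : Int) : Decidable (Spec_create_bit_vector string out) := by unfold Spec_create_bit_vector; infer_instance

-- ===== CLAIM (what is proved, stated in full; the proofs are below) =====
def Claim_equal_create_bit_vector : Prop := ∀ (string : String), Dom_create_bit_vector string → Spec_create_bit_vector string (create_bit_vector string)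

-- ===== LEMMAS AND PROOFS =====

-- the Nat-valued mask of a (lowered) character
def pvMaskN (c : Char) : Nat := 1 <<< (c.toNat - 32)

theorem pvMaskI (c : Char) : (1 : Int) <<< ((c.toNat - 32 : Nat)) = ((pvMaskN c : Nat) : Int) := by
  simp [pvMaskN, Int.shiftLeft_eq, Nat.shiftLeft_eq]

-- A's guarded loop is the plain XOR loop over the lowered alphanumeric characters
theorem pvA_filter_map (l : List Char) (a : Int) :
    l.foldl (fun bv c =>
      if PySem.Chars.isalnum c then
        PySem.Int.bxor bv ((1 : Int) <<< (((PySem.Chars.lowerChar c).toNat - 32 : Nat)))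
      else bv) a
    = ((l.filter PySem.Chars.isalnum).map PySem.Chars.lowerChar).foldl
        (fun bv x => PySem.Int.bxor bv ((1 : Int) <<< ((x.toNat - 32 : Nat)))) a := by
  induction l generalizing a with
  | nil => rfl
  | cons c t ih => by_cases h : PySem.Chars.isalnum c = true <;> simp [h, ih]

-- B's guarded counting loop is the counting loop over the lowered alphanumeric characters
theorem pvB_filter_map (l : List Char) (d : PySem.Dict Char Int) :
    l.foldl (fun d c =>
      if PySem.Chars.isalnum c then
        d.insert (PySem.Chars.lowerChar c) (d.getD (PySem.Chars.lowerChar c) 0 + 1)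
      else d) d
    = ((l.filter PySem.Chars.isalnum).map PySem.Chars.lowerChar).foldl
        (fun d x => d.insert x (d.getD x 0 + 1)) d := by
  induction l generalizing d with
  | nil => rfl
  | cons c t ih => by_cases h : PySem.Chars.isalnum c = true <;> simp [h, ih]

-- lift the Int XOR loops to Nat
theorem pvLiftA (xs : List Char) (a : Nat) :
    xs.foldl (fun bv x => PySem.Int.bxor bv ((1 : Int) <<< ((x.toNat - 32 : Nat)))) (a : Int)
    = ((xs.foldl (fun bv x => bv ^^^ pvMaskN x) a : Nat) : Int) := by
  induction xs generalizing a with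
  | nil => rfl
  | cons x t ih =>
    rw [List.foldl_cons, pvMaskI, PySem.Int.bxor_natCast]
    exact ih (a ^^^ pvMaskN x)

theorem pvLiftB (p : Char → Bool) (xs : List Char) (a : Nat) :
    xs.foldl (fun bv k => if p k then PySem.Int.bxor bv ((1 : Int) <<< ((k.toNat - 32 : Nat))) else bv) (a : Int)
    = ((xs.foldl (fun bv k => if p k then bv ^^^ pvMaskN k else bv) a : Nat) : Int) := by
  induction xs generalizing a with
  | nil => rfl
  | cons x t ih =>
    by_cases h : p x = true
    · rw [List.foldl_cons, if_pos h, List.foldl_cons, if_pos h,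
          pvMaskI, PySem.Int.bxor_natCast]
      exact ih (a ^^^ pvMaskN x)
    · rw [List.foldl_cons, if_neg h, List.foldl_cons, if_neg h]
      exact ih a

-- XOR folds: peel the accumulator
theorem pvXorShift (g : Char → Nat) (xs : List Char) (a : Nat) :
    xs.foldl (fun bv x => bv ^^^ g x) a = a ^^^ xs.foldl (fun bv x => bv ^^^ g x) 0 := by
  induction xs generalizing a with
  | nil => simp
  | cons x t ih =>
    simp only [List.foldl_cons]
    rw [ih (a ^^^ g x), ih (0 ^^^ g x), Nat.zero_xor, Nat.xor_assoc]

-- absorb the guard into the XORed value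
theorem pvGuardAbsorb (p : Char → Bool) (g : Char → Nat) (xs : List Char) (a : Nat) :
    xs.foldl (fun bv k => if p k then bv ^^^ g k else bv) a
    = xs.foldl (fun bv k => bv ^^^ (if p k then g k else 0)) a := by
  induction xs generalizing a with
  | nil => rfl
  | cons x t ih => by_cases h : p x = true <;> simp [h, ih]

-- XOR folds are permutation invariant
theorem pvXorPerm (g : Char → Nat) {xs ys : List Char} (h : xs.Perm ys) (a : Nat) :
    xs.foldl (fun bv x => bv ^^^ g x) a = ys.foldl (fun bv x => bv ^^^ g x) a := by
  haveI : RightCommutative (fun (bv : Nat) (x : Char) => bv ^^^ g x) :=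
    ⟨fun b x y => by simp [Nat.xor_assoc, Nat.xor_comm (g x) (g y)]⟩
  exact h.foldl_eq a

-- the core parity fact: XOR over a list = XOR over its distinct elements with odd count
theorem pvParity (m : List Char) :
    m.foldl (fun bv x => bv ^^^ pvMaskN x) 0
    = (PySem.List.dedup m).foldl
        (fun bv k => bv ^^^ (if m.count k % 2 == 1 then pvMaskN k else 0)) 0 := by
  induction m with
  | nil => rfl
  | cons x t ih =>
    -- dedup (x :: t) is a permutation of x :: (dedup t).erase x
    have hnd : (PySem.List.dedup t).Nodup := PySem.List.nodup_dedup t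
    have hxe : x ∉ (PySem.List.dedup t).erase x := by
      intro hmem
      exact ((hnd.mem_erase_iff).mp hmem).1 rfl
    have hperm : (PySem.List.dedup (x :: t)).Perm (x :: (PySem.List.dedup t).erase x) := by
      rw [List.perm_ext_iff_of_nodup (PySem.List.nodup_dedup _) ((hnd.erase x).cons hxe)]
      intro a
      by_cases hax : a = x <;>
        simp [hax]
    -- on (dedup t).erase x the counts in x :: t and in t agree
    have hcongr : ∀ (bv : Nat), ∀ k ∈ (PySem.List.dedup t).erase x,
        (bv ^^^ (if (x :: t).count k % 2 == 1 then pvMaskN k else 0))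
        = (bv ^^^ (if t.count k % 2 == 1 then pvMaskN k else 0)) := by
      intro bv k hk
      have hne : k ≠ x := (hnd.mem_erase_iff.mp hk).1
      have hcnt : (x :: t).count k = t.count k := by
        simp [Ne.symm hne]
      rw [hcnt]
    rw [List.foldl_cons, Nat.zero_xor, pvXorShift, ih]
    conv_rhs => rw [pvXorPerm _ hperm 0, List.foldl_cons, Nat.zero_xor,
                    PySem.List.foldl_congr_mem _ _ _ _ hcongr, pvXorShift]
    by_cases hxt : x ∈ t
    · -- x already occurs: its parity flips, the other keys are untouched
      have hxd : x ∈ PySem.List.dedup t := (PySem.List.mem_dedup t x).mpr hxt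
      have hsplit :
          (PySem.List.dedup t).foldl
              (fun bv k => bv ^^^ (if t.count k % 2 == 1 then pvMaskN k else 0)) 0
          = (if t.count x % 2 == 1 then pvMaskN x else 0) ^^^
            ((PySem.List.dedup t).erase x).foldl
              (fun bv k => bv ^^^ (if t.count k % 2 == 1 then pvMaskN k else 0)) 0 := by
        rw [pvXorPerm _ (List.perm_cons_erase hxd) 0, List.foldl_cons, Nat.zero_xor, pvXorShift]
      rw [hsplit, List.count_cons_self]
      rcases Nat.mod_two_eq_zero_or_one (t.count x) with hpar | hpar
      · rw [if_neg (by simp [hpar]), if_pos (by simp [Nat.add_mod, hpar]), Nat.zero_xor]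
      · rw [if_pos (by simp [hpar]), if_neg (by simp [Nat.add_mod, hpar]),
            ← Nat.xor_assoc, Nat.xor_self, Nat.zero_xor]
    · -- x is new: it contributes its mask once
      have hxd : x ∉ PySem.List.dedup t := fun h => hxt ((PySem.List.mem_dedup t x).mp h)
      rw [List.erase_of_not_mem hxd, List.count_cons_self, List.count_eq_zero.mpr hxt]
      norm_num

-- the Bool condition on the Int count agrees with the one on the Nat count
theorem pvCondInt (c : Nat) : (PySem.Int.mod (c : Int) 2 == 1) = (c % 2 == 1) := by
  rw [show ((2 : Int)) = ((2 : Nat) : Int) by norm_num, PySem.Int.mod_natCast]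
  rcases Nat.mod_two_eq_zero_or_one c with h | h <;> simp [h]

-- ===== VERDICT (by name: the statement is the Claim_ definition above) =====
theorem create_bit_vector_spec : Claim_equal_create_bit_vector := by
  intro s _
  unfold Spec_create_bit_vector create_bit_vector create_bit_vector_alt
  rw [pvA_filter_map, pvB_filter_map]
  dsimp only
  rw [PySem.Dict.foldl_insert_getD_add_one_eq_counter, PySem.Dict.items_counter]
  conv_rhs => rw [List.foldl_map]
  simp only [pvCondInt]
  rw [show ((0 : Int)) = ((0 : Nat) : Int) from rfl, pvLiftA,
      pvLiftB (fun k => ((s.toList.filter PySem.Chars.isalnum).map PySem.Chars.lowerChar).count k % 2 == 1)]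
  rw [pvGuardAbsorb, ← PySem.List.dedup_eq_ofList]
  exact congrArg _ (pvParity _)
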